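-- pv_equiv track=rewrite | github.com/rissh/Data-Structures | GeeksForGeeks/Maximize The Array.py | maximizeArray
-- ===== SOURCE A (Python) =====
-- import heapq
--
-- def maximizeArray(arr1, arr2, n):
--     # code here
--     heap = []
--     a = set()
--     for i, j in enumerate(arr2+arr1):
--         if j not in a:
--             heapq.heappush(heap, (j, i))
--             a.add(j)
--             if len(heap)>n:
--                 heapq.heappop(heap)
--     return [arr[0] for arr in sorted(heap, key=lambda arr: arr[1])]
-- ===== SOURCE B (Python) =====
-- def maximizeArray(arr1, arr2, n):
--     # value -> kept in first-occurrence order of arr2+arr1 (dict preserves insertion order)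
--     seen = dict.fromkeys(arr2 + arr1)
--     # the n largest distinct values (all of them if fewer than n)
--     top = set(sorted(seen, reverse=True)[:max(n, 0)])
--     return [v for v in seen if v in top]
-- ===== Notes on version B (the rewrite author's own statement) =====
-- stated objective: simpler
-- what changed: Replaces the bounded heap of (value, index) pairs, the explicit seen-set bookkeeping and the final sort-by-index with: ordered dedup via dict.fromkeys, one sort of the distinct values to pick the n largest, and a filter of the dedup list (which is already in first-occurrence order, so no index bookkeeping or final sort is needed); a timing run measured B about 4x faster.
import Mathlib
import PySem

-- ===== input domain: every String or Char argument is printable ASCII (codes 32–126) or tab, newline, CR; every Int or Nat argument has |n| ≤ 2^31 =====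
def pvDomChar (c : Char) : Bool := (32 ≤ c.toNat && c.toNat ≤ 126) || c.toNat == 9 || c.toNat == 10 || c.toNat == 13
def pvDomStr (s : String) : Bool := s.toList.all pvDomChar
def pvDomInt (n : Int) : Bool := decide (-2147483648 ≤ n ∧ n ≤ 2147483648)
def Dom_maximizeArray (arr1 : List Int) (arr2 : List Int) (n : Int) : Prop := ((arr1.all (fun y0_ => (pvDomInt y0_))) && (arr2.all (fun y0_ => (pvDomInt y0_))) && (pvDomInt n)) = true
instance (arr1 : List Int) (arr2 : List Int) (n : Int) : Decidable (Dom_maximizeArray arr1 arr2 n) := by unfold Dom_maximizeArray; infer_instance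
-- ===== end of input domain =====

-- B replaces A's bounded heap + seen-set bookkeeping + final sort-by-index with an ordered
-- dedup, one sort of the distinct values to pick the n largest, and a filter of the dedup
-- list, which is already in first-occurrence order (simpler).

-- ===== PORT A =====
-- heapq is modelled at the multiset level (exact for this program: only the heap's CONTENTS
-- matter, because the heap is sorted before being returned): heappush appends, heappop
-- removes the lexicographically smallest (value, index) pair — exactly what heapq.heappop removes.
def pvHeapPop (h : List (Int × Int)) : List (Int × Int) :=
  match PySem.List.min2? h Prod.fst Prod.snd with
  | none => h
  | some m => h.erase m

-- the loop body: 'if j not in a: heappush(heap, (j, i)); a.add(j); if len(heap) > n: heappop(heap)'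
def pvStepA (n : Int) (st : List (Int × Int) × PySem.Set Int) (p : Int × Int) :
    List (Int × Int) × PySem.Set Int :=
  if PySem.Set.contains st.2 p.2 then st
  else
    let heap := st.1 ++ [(p.2, p.1)]
    let seen := PySem.Set.add st.2 p.2
    if (heap.length : Int) > n then (pvHeapPop heap, seen) else (heap, seen)

def maximizeArray (arr1 : List Int) (arr2 : List Int) (n : Int) : List Int :=
  let st := (PySem.List.enumerate (arr2 ++ arr1) 0).foldl (pvStepA n)
    (([] : List (Int × Int)), (PySem.Set.empty : PySem.Set Int))
  (PySem.List.sorted st.1 (fun q => q.2) false).map (fun q => q.1)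

-- ===== PORT B =====
def maximizeArray_alt (arr1 : List Int) (arr2 : List Int) (n : Int) : List Int :=
  let seen := PySem.List.dedup (arr2 ++ arr1)
  let top : PySem.Set Int :=
    PySem.Set.ofList
      (PySem.List.slice (PySem.List.sorted seen (fun v => v) true) none (some (max n 0)))
  seen.filter (fun v => PySem.Set.contains top v)

-- ===== PRECONDITION & SPEC =====
def Spec_maximizeArray (arr1 : List Int) (arr2 : List Int) (n : Int) (out : List Int) : Prop := out = maximizeArray_alt arr1 arr2 n
instance (arr1 : List Int) (arr2 : List Int) (n : Int) (out : List Int) : Decidable (Spec_maximizeArray arr1 arr2 n out) := by unfold Spec_maximizeArray; infer_instance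

-- ===== CLAIM (what is proved, stated in full; the proofs are below) =====
def Claim_equal_maximizeArray : Prop := ∀ (arr1 : List Int) (arr2 : List Int) (n : Int), Dom_maximizeArray arr1 arr2 n → Spec_maximizeArray arr1 arr2 n (maximizeArray arr1 arr2 n)

-- ===== LEMMAS AND PROOFS =====

-- the accumulator step of PySem.List.min2? on (value, index) pairs, named for induction
def pvMinStep (acc : Option (Int × Int)) (x : Int × Int) : Option (Int × Int) :=
  match acc with
  | none => some x
  | some m =>
      if (decide (x.1 < m.1) || !decide (m.1 < x.1) && decide (x.2 < m.2)) = true then some x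
      else some m

lemma pvMin2_eq_foldl (xs : List (Int × Int)) :
    PySem.List.min2? xs Prod.fst Prod.snd = xs.foldl pvMinStep none := by
  unfold PySem.List.min2?
  congr 1
  funext acc x
  cases acc <;> rfl

lemma pvMinStep_red (acc x : Int × Int) :
    pvMinStep (some acc) x =
      if (decide (x.1 < acc.1) || !decide (acc.1 < x.1) && decide (x.2 < acc.2)) = true then some x
      else some acc := rfl

lemma pvMinStep_some (acc : Int × Int) (x : Int × Int) :
    pvMinStep (some acc) x = some x ∨ pvMinStep (some acc) x = some acc := by
  rw [pvMinStep_red]; split <;> simp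

lemma pvMin2_run (t : List (Int × Int)) : ∀ acc : Int × Int, ∃ m, t.foldl pvMinStep (some acc) = some m := by
  induction t with
  | nil => exact fun acc => ⟨acc, rfl⟩
  | cons a t ih =>
    intro acc
    rw [List.foldl_cons]
    rcases pvMinStep_some acc a with h | h <;> rw [h] <;> exact ih _

lemma pvMin2_go (t : List (Int × Int)) : ∀ (acc m : Int × Int),
    t.foldl pvMinStep (some acc) = some m →
    (m ∈ t ∨ m = acc) ∧ (∀ y ∈ t, ¬ y.1 < m.1) ∧ ¬ acc.1 < m.1 := by
  induction t with
  | nil => intro acc m h; simp at h; subst h; simp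
  | cons a t ih =>
    intro acc m h
    rw [List.foldl_cons] at h
    by_cases hc : (decide (a.1 < acc.1) || !decide (acc.1 < a.1) && decide (a.2 < acc.2)) = true
    · rw [show pvMinStep (some acc) a = some a from by rw [pvMinStep_red, if_pos hc]] at h
      obtain ⟨h1, h2, h3⟩ := ih a m h
      simp only [Bool.or_eq_true, Bool.and_eq_true, decide_eq_true_eq, Bool.not_eq_true',
        decide_eq_false_iff_not] at hc
      refine ⟨by rcases h1 with h1 | h1 <;> simp [h1], ?_, ?_⟩
      · intro y hy
        rcases List.mem_cons.mp hy with h' | h'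
        · subst h'; exact h3
        · exact h2 y h'
      · rcases hc with hc | ⟨hc, _⟩ <;> intro hlt <;> exact h3 (by omega)
    · rw [show pvMinStep (some acc) a = some acc from by rw [pvMinStep_red, if_neg hc]] at h
      obtain ⟨h1, h2, h3⟩ := ih acc m h
      simp only [Bool.or_eq_true, Bool.and_eq_true, decide_eq_true_eq, Bool.not_eq_true',
        decide_eq_false_iff_not, not_or, not_and] at hc
      refine ⟨by rcases h1 with h1 | h1 <;> simp [h1], ?_, h3⟩
      intro y hy
      rcases List.mem_cons.mp hy with h' | h'
      · subst h'; obtain ⟨hc1, _⟩ := hc; intro hlt; exact h3 (by omega)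
      · exact h2 y h'

lemma pvMin2_some (xs : List (Int × Int)) (hne : xs ≠ []) :
    ∃ m, PySem.List.min2? xs Prod.fst Prod.snd = some m ∧ m ∈ xs ∧ ∀ y ∈ xs, ¬ y.1 < m.1 := by
  match xs with
  | [] => exact absurd rfl hne
  | a :: t =>
    obtain ⟨m, hm⟩ := pvMin2_run t a
    have hgo := pvMin2_go t a m hm
    refine ⟨m, ?_, ?_, ?_⟩
    · rw [pvMin2_eq_foldl, List.foldl_cons]
      exact hm
    · rcases hgo.1 with h1 | h1
      · exact List.mem_cons_of_mem _ h1
      · simp [h1]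
    · intro y hy
      rcases List.mem_cons.mp hy with h' | h'
      · subst h'; exact hgo.2.2
      · exact hgo.2.1 y h'

-- ghost: the deduplicated (value, first-index) pairs the loop pushes
def pvPairs (seen : List Int) (i : Int) : List Int → List (Int × Int)
  | [] => []
  | x :: t => if x ∈ seen then pvPairs seen (i + 1) t else (x, i) :: pvPairs (x :: seen) (i + 1) t

-- the loop invariant: the heap is a sublist of the pushed pairs, holds min(|pushed|, k) of
-- them, and dominates (by value) every pushed pair that is not in it
def pvInv (k : Nat) (P h : List (Int × Int)) : Prop :=
  h.Sublist P ∧ h.length = min P.length k ∧ ∀ z ∈ P, z ∉ h → ∀ y ∈ h, z.1 < y.1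

lemma pvPairs_congr : ∀ (t : List Int) (s s' : List Int) (i : Int),
    (∀ v, v ∈ s ↔ v ∈ s') → pvPairs s i t = pvPairs s' i t := by
  intro t
  induction t with
  | nil => intro _ _ _ _; rfl
  | cons x t ih =>
    intro s s' i hm
    simp only [pvPairs]
    by_cases hx : x ∈ s
    · rw [if_pos hx, if_pos ((hm x).mp hx)]
      exact ih s s' (i + 1) hm
    · rw [if_neg hx, if_neg (fun h => hx ((hm x).mpr h))]
      refine congrArg _ (ih _ _ _ ?_)
      intro v; simp [hm v]

lemma pvPairs_pairwise : ∀ (t : List Int) (s : List Int) (i : Int),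
    (∀ z ∈ pvPairs s i t, i ≤ z.2) ∧ (pvPairs s i t).Pairwise (fun a b => a.2 < b.2) := by
  intro t
  induction t with
  | nil => intro s i; simp [pvPairs]
  | cons x t ih =>
    intro s i
    simp only [pvPairs]
    by_cases hx : x ∈ s
    · rw [if_pos hx]
      obtain ⟨h1, h2⟩ := ih s (i + 1)
      exact ⟨fun z hz => by have := h1 z hz; omega, h2⟩
    · rw [if_neg hx]
      obtain ⟨h1, h2⟩ := ih (x :: s) (i + 1)
      constructor
      · intro z hz
        rcases List.mem_cons.mp hz with h | h
        · subst h; simp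
        · have := h1 z h; omega
      · refine List.pairwise_cons.mpr ⟨?_, h2⟩
        intro b hb; have := h1 b hb; simp; omega

lemma pvPairs_update : ∀ (t : List Int) (s s' : List Int) (i : Int),
    (∀ v, v ∈ s ↔ v ∈ s') →
    PySem.Set.update s' t = s' ++ (pvPairs s i t).map Prod.fst := by
  intro t
  induction t with
  | nil => intro s s' i _; simp [pvPairs, PySem.Set.update_nil]
  | cons x t ih =>
    intro s s' i hm
    rw [PySem.Set.update_cons]
    simp only [pvPairs]
    by_cases hx : x ∈ s
    · rw [if_pos hx, PySem.Set.add_of_mem ((hm x).mp hx)]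
      exact ih s s' (i + 1) hm
    · rw [if_neg hx, PySem.Set.add_of_not_mem (fun h => hx ((hm x).mpr h))]
      rw [ih (x :: s) (s' ++ [x]) (i + 1) (by intro v; simp [hm v]; tauto)]
      simp

lemma pvPairs_fst (xs : List Int) :
    (pvPairs [] 0 xs).map Prod.fst = PySem.List.dedup xs := by
  have := pvPairs_update xs [] [] 0 (fun v => Iff.rfl)
  simp only [List.nil_append] at this
  rw [PySem.List.dedup, ← PySem.Set.update_nil_left, this]

-- distinct first components: equal firsts force equal pairs
lemma pvInjFst : ∀ (l : List (Int × Int)), (l.map Prod.fst).Nodup →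
    ∀ a ∈ l, ∀ b ∈ l, a.1 = b.1 → a = b := by
  intro l
  induction l with
  | nil => simp
  | cons c t ih =>
    intro hnd a ha b hb hab
    simp only [List.map_cons, List.nodup_cons] at hnd
    rcases List.mem_cons.mp ha with h1 | h1 <;> rcases List.mem_cons.mp hb with h2 | h2
    · rw [h1, h2]
    · subst h1
      exact absurd (show a.1 ∈ t.map Prod.fst from hab ▸ List.mem_map_of_mem h2) hnd.1
    · subst h2
      exact absurd (show b.1 ∈ t.map Prod.fst from hab ▸ List.mem_map_of_mem h1) hnd.1
    · exact ih hnd.2 a h1 b h2 hab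

-- a sublist of a Nodup list is recovered by filtering on membership
lemma pvFilterMem : ∀ {h P : List (Int × Int)}, h.Sublist P → P.Nodup →
    P.filter (fun z => decide (z ∈ h)) = h := by
  intro h P hsub
  induction hsub with
  | slnil => intro _; rfl
  | cons a hsub ih =>
    intro hnd
    rename_i l₁ l₂
    simp only [List.nodup_cons] at hnd
    have ha : a ∉ l₁ := fun hmem => hnd.1 (hsub.subset hmem)
    simp only [List.filter_cons, decide_eq_true_eq]
    rw [if_neg (by simpa using ha)]
    exact ih hnd.2
  | cons₂ a hsub ih =>
    intro hnd
    rename_i l₁ l₂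
    simp only [List.nodup_cons] at hnd
    simp only [List.filter_cons]
    rw [if_pos (by simp)]
    have : l₂.filter (fun z => decide (z ∈ a :: l₁)) = l₂.filter (fun z => decide (z ∈ l₁)) := by
      apply List.filter_congr
      intro z hz
      have : z ≠ a := fun h => hnd.1 (h ▸ hz)
      simp [this]
    rw [this, ih hnd.2]

-- one loop iteration preserves the invariant
lemma pvStep_inv (n : Int) (P h : List (Int × Int)) (x : Int × Int)
    (hinv : pvInv (max n 0).toNat P h)
    (hnd : ((P ++ [x]).map Prod.fst).Nodup) :
    pvInv (max n 0).toNat (P ++ [x])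
      (if ((h ++ [x]).length : Int) > n then pvHeapPop (h ++ [x]) else h ++ [x]) := by
  set k := (max n 0).toNat with hk
  obtain ⟨hsub, hlen, hdom⟩ := hinv
  have hkn : (k : Int) = max n 0 := by
    rw [hk]; exact Int.toNat_of_nonneg (le_max_right n 0)
  have hP1nd : (P ++ [x]).Nodup := List.Nodup.of_map Prod.fst hnd
  have hsub1 : (h ++ [x]).Sublist (P ++ [x]) := List.Sublist.append hsub (List.Sublist.refl _)
  by_cases hc : ((h ++ [x]).length : Int) > n
  · rw [if_pos hc]
    have hlk : h.length = k ∧ k ≤ P.length := by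
      simp only [List.length_append, List.length_singleton] at hc
      by_cases hPk : P.length < k
      · exfalso
        have : h.length = P.length := by omega
        omega
      · constructor <;> omega
    obtain ⟨m, hm_eq, hm_mem, hm_min⟩ := pvMin2_some (h ++ [x]) (by simp)
    have hpop : pvHeapPop (h ++ [x]) = (h ++ [x]).erase m := by
      unfold pvHeapPop; rw [hm_eq]
    rw [hpop]
    have hh1nd : (h ++ [x]).Nodup := hP1nd.sublist hsub1
    have hfst1 : ((h ++ [x]).map Prod.fst).Nodup := (List.Sublist.map Prod.fst hsub1).nodup hnd
    refine ⟨(List.erase_sublist).trans hsub1, ?_, ?_⟩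
    · rw [List.length_erase_of_mem hm_mem]
      simp only [List.length_append, List.length_singleton]
      omega
    · intro z hz hznot y hy
      have hy1 : y ∈ h ++ [x] := (List.erase_sublist).subset hy
      have hym : y ≠ m := fun e => by
        subst e
        exact absurd hy (by
          intro hcontra
          exact ((List.Nodup.mem_erase_iff hh1nd).mp hcontra).1 rfl)
      by_cases hzin : z ∈ h ++ [x]
      · have hzm : z = m := by
          by_contra hne
          exact hznot ((List.Nodup.mem_erase_iff hh1nd).mpr ⟨hne, hzin⟩)
        subst hzm
        have : ¬ y.1 < z.1 := hm_min y hy1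
        have : z.1 ≠ y.1 := fun e => hym (pvInjFst _ hfst1 y hy1 z hm_mem e.symm)
        omega
      · have hzP : z ∈ P := by
          rcases List.mem_append.mp hz with h' | h'
          · exact h'
          · exfalso; exact hzin (List.mem_append.mpr (Or.inr h'))
        have hznh : z ∉ h := fun h' => hzin (List.mem_append.mpr (Or.inl h'))
        have hold := hdom z hzP hznh
        rcases List.mem_append.mp hy1 with hyh | hyx
        · exact hold y hyh
        · have hyx' : y = x := by simpa using hyx
          subst hyx'
          have hmx : m ≠ y := fun e => hym e.symm
          have hmh : m ∈ h := by
            rcases List.mem_append.mp hm_mem with h' | h'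
            · exact h'
            · exact absurd (by simpa using h') hmx
          have h1 : z.1 < m.1 := hold m hmh
          have h2 : ¬ y.1 < m.1 := hm_min y (List.mem_append.mpr (Or.inr (by simp)))
          omega
  · rw [if_neg hc]
    have hsmall : P.length < k ∧ h.length = P.length := by
      simp only [List.length_append, List.length_singleton] at hc
      omega
    have hPeq : h = P := hsub.eq_of_length (by omega)
    subst hPeq
    refine ⟨List.Sublist.refl _, by simp; omega, ?_⟩
    intro z hz hznot
    exact absurd hz (by simpa using hznot)

-- the whole loop: the heap satisfies the invariant for the pushed pairs
lemma pvFoldA (n : Int) : ∀ (xs : List Int) (i : Int) (P h : List (Int × Int)) (seen : PySem.Set Int),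
    pvInv (max n 0).toNat P h →
    (P.map Prod.fst).Nodup →
    (∀ v, v ∈ seen ↔ v ∈ P.map Prod.fst) →
    pvInv (max n 0).toNat (P ++ pvPairs seen i xs)
      (((PySem.List.enumerate xs i).foldl (pvStepA n) (h, seen)).1) := by
  intro xs
  induction xs with
  | nil =>
    intro i P h seen hinv _ _
    simpa [PySem.List.enumerate_nil, pvPairs] using hinv
  | cons x t ih =>
    intro i P h seen hinv hnd hseen
    rw [PySem.List.enumerate_cons, List.foldl_cons]
    by_cases hx : x ∈ seen
    · have hstep : pvStepA n (h, seen) (i, x) = (h, seen) := by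
        unfold pvStepA
        rw [if_pos (by simpa [PySem.Set.contains_iff] using hx)]
      rw [hstep]
      have hres := ih (i + 1) P h seen hinv hnd hseen
      rwa [show pvPairs seen i (x :: t) = pvPairs seen (i + 1) t from by
        simp only [pvPairs, if_pos hx]]
    · have hxP : x ∉ P.map Prod.fst := fun h' => hx ((hseen x).mpr h')
      have hnd' : ((P ++ [(x, i)]).map Prod.fst).Nodup := by
        simp only [List.map_append, List.map_cons, List.map_nil]
        simp [List.nodup_append, hnd]
        intro a b hab e
        exact hxP (e ▸ List.mem_map_of_mem hab)
      have hstep : pvStepA n (h, seen) (i, x) =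
          ((if ((h ++ [(x, i)]).length : Int) > n then pvHeapPop (h ++ [(x, i)]) else h ++ [(x, i)]),
            PySem.Set.add seen x) := by
        unfold pvStepA
        rw [if_neg (by simpa [PySem.Set.contains_iff] using hx)]
        simp only []
        split <;> rfl
      rw [hstep]
      have hinv' := pvStep_inv n P h (x, i) hinv hnd'
      have hseen' : ∀ v, v ∈ PySem.Set.add seen x ↔ v ∈ (P ++ [(x, i)]).map Prod.fst := by
        intro v
        rw [PySem.Set.add_of_not_mem hx]
        simp [hseen v, or_comm]
      have hres := ih (i + 1) (P ++ [(x, i)]) _ (PySem.Set.add seen x) hinv' hnd' hseen'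
      rw [show pvPairs seen i (x :: t) = (x, i) :: pvPairs (x :: seen) (i + 1) t from by
        simp only [pvPairs, if_neg hx]]
      rw [show pvPairs (x :: seen) (i + 1) t = pvPairs (PySem.Set.add seen x) (i + 1) t from
        pvPairs_congr t _ _ _ (by intro v; rw [PySem.Set.add_of_not_mem hx]; simp [or_comm])]
      rw [List.append_cons]
      exact hres

-- membership in the final heap = fewer than k strictly larger pushed values
lemma pvInv_mem (k : Nat) (P h : List (Int × Int)) (hinv : pvInv k P h)
    (hnd : (P.map Prod.fst).Nodup) (z : Int × Int) (hz : z ∈ P) :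
    z ∈ h ↔ (P.filter (fun w => decide (z.1 < w.1))).length < k := by
  obtain ⟨hsub, hlen, hdom⟩ := hinv
  have Pnd : P.Nodup := List.Nodup.of_map Prod.fst hnd
  have hhnd : h.Nodup := Pnd.sublist hsub
  constructor
  · intro zh
    have hk1 : 0 < h.length := List.length_pos_of_mem zh
    have hFsub : P.filter (fun w => decide (z.1 < w.1)) ⊆ h.erase z := by
      intro w hw
      have hw' := List.of_mem_filter hw
      have hwP := List.mem_of_mem_filter hw
      simp only [decide_eq_true_eq] at hw'
      have hwh : w ∈ h := by
        by_contra hwnh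
        exact absurd (hdom w hwP hwnh z zh) (by omega)
      exact (List.Nodup.mem_erase_iff hhnd).mpr ⟨fun e => by subst e; omega, hwh⟩
    have hFnd : (P.filter (fun w => decide (z.1 < w.1))).Nodup := Pnd.filter _
    have hle := List.Subperm.length_le (List.subperm_of_subset hFnd hFsub)
    rw [List.length_erase_of_mem zh] at hle
    omega
  · intro hlt
    by_contra hzh
    have hall : ∀ y ∈ h, z.1 < y.1 := hdom z hz hzh
    have heq : h.filter (fun w => decide (z.1 < w.1)) = h :=
      List.filter_eq_self.mpr (fun y hy => by simpa using hall y hy)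
    have hsubf := List.Sublist.filter (fun w => decide (z.1 < w.1)) hsub
    rw [heq] at hsubf
    have hle := hsubf.length_le
    have hne : h ≠ P := fun e => hzh (e ▸ hz)
    have hlt2 : h.length < P.length := by
      rcases Nat.lt_or_ge h.length P.length with h' | h'
      · exact h'
      · exact absurd (hsub.eq_of_length (le_antisymm hsub.length_le h')) hne
    omega

-- membership in the first k entries of a strictly descending list
lemma pvMemTake : ∀ (s : List Int), s.Pairwise (fun a b => b < a) →
    ∀ (k : Nat) (v : Int), v ∈ s.take k ↔ v ∈ s ∧ (s.filter (fun w => decide (v < w))).length < k := by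
  intro s
  induction s with
  | nil => intro _ k v; simp
  | cons a t ih =>
    intro hp k v
    obtain ⟨ha, hpt⟩ := List.pairwise_cons.mp hp
    match k with
    | 0 => simp
    | k + 1 =>
      rw [List.take_succ_cons]
      by_cases hv : v = a
      · subst hv
        have hfil : t.filter (fun w => decide (v < w)) = [] :=
          List.filter_eq_nil_iff.mpr (fun b hb => by have := ha b hb; simp; omega)
        simp [hfil]
      · have hmem : v ∈ a :: List.take k t ↔ v ∈ List.take k t := by simp [hv]
        rw [hmem, ih hpt k v]
        by_cases hvt : v ∈ t
        · have hva : v < a := ha v hvt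
          rw [List.filter_cons, if_pos (by simpa using hva)]
          simp only [List.mem_cons, hv, false_or, hvt, true_and, List.length_cons]
          omega
        · have hnt : v ∉ List.take k t := fun h => hvt (List.mem_of_mem_take h)
          simp [hv, hvt]

lemma pvMemTopn (D : List Int) (hnd : D.Nodup) (k : Nat) (v : Int) :
    v ∈ (PySem.List.sorted D (fun x => x) true).take k ↔
      v ∈ D ∧ (D.filter (fun w => decide (v < w))).length < k := by
  have hperm : (PySem.List.sorted D (fun x => x) true).Perm D := PySem.List.sorted_perm D _ _
  have hsnd : (PySem.List.sorted D (fun x => x) true).Nodup := (hperm.nodup_iff).mpr hnd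
  have hge : (PySem.List.sorted D (fun x => x) true).Pairwise (fun a b => b ≤ a) :=
    PySem.List.sorted_pairwise_rev D _
  have hdesc : (PySem.List.sorted D (fun x => x) true).Pairwise (fun a b => b < a) := by
    have := List.Pairwise.and hge hsnd
    exact this.imp (fun {a b} h => lt_of_le_of_ne h.1 (Ne.symm h.2))
  rw [pvMemTake _ hdesc k v, hperm.mem_iff, (hperm.filter _).length_eq]

-- ===== VERDICT (by name: the statement is the Claim_ definition above) =====
theorem maximizeArray_spec : Claim_equal_maximizeArray := by
  intro arr1 arr2 n _
  unfold Spec_maximizeArray maximizeArray maximizeArray_alt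
  simp only []
  have hinv0 : pvInv (max n 0).toNat [] [] := ⟨List.Sublist.refl _, by simp, by simp⟩
  have hinv := pvFoldA n (arr2 ++ arr1) 0 [] [] PySem.Set.empty hinv0 (by simp)
    (by intro v; simp [PySem.Set.empty])
  rw [show pvPairs PySem.Set.empty 0 (arr2 ++ arr1) = pvPairs [] 0 (arr2 ++ arr1) from
    pvPairs_congr _ _ _ _ (by intro v; simp [PySem.Set.empty]), List.nil_append] at hinv
  set k := (max n 0).toNat with hkdef
  set Pf := pvPairs [] 0 (arr2 ++ arr1) with hPf
  set hF := ((PySem.List.enumerate (arr2 ++ arr1) 0).foldl (pvStepA n)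
    (([] : List (Int × Int)), (PySem.Set.empty : PySem.Set Int))).1 with hhF
  set D := PySem.List.dedup (arr2 ++ arr1) with hD
  have hfst : Pf.map Prod.fst = D := pvPairs_fst (arr2 ++ arr1)
  have hndD : D.Nodup := PySem.List.nodup_dedup _
  have hndPf : (Pf.map Prod.fst).Nodup := by rw [hfst]; exact hndD
  have hPfnd : Pf.Nodup := List.Nodup.of_map Prod.fst hndPf
  have hpairPf : Pf.Pairwise (fun a b => a.2 < b.2) := (pvPairs_pairwise (arr2 ++ arr1) [] 0).2
  have hpairF : hF.Pairwise (fun a b => a.2 < b.2) := hpairPf.sublist hinv.1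
  -- the heap is already in index order, so the final Python sort leaves it unchanged
  rw [PySem.List.sorted_eq_self_of_pairwise hF (fun q => q.2)
    (hpairF.imp (fun {a b} h => le_of_lt h))]
  -- rewrite the slice [:max(n,0)] as a take
  rw [PySem.List.slice_to _ (le_max_right n 0)]
  set topk := (PySem.List.sorted D (fun v => v) true).take (max n 0).toNat with htopk
  -- the heap is the pushed pairs filtered by heap membership
  have hfil : Pf.filter (fun z => decide (z ∈ hF)) = hF := pvFilterMem hinv.1 hPfnd
  have hcongr : Pf.filter (fun z => decide (z ∈ hF)) =
      Pf.filter (fun z => decide (z.1 ∈ topk)) := by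
    apply List.filter_congr
    intro z hz
    have h1 : z ∈ hF ↔ (Pf.filter (fun w => decide (z.1 < w.1))).length < k :=
      pvInv_mem k Pf hF hinv hndPf z hz
    have hzD : z.1 ∈ D := by rw [← hfst]; exact List.mem_map_of_mem hz
    have h2 : z.1 ∈ topk ↔ z.1 ∈ D ∧ (D.filter (fun w => decide (z.1 < w))).length < k := by
      rw [htopk, ← hkdef]
      exact pvMemTopn D hndD k z.1
    have hlen : (D.filter (fun w => decide (z.1 < w))).length =
        (Pf.filter (fun w => decide (z.1 < w.1))).length := by
      rw [← hfst, List.filter_map, List.length_map]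
      rfl
    simp only [decide_eq_decide]
    rw [h1, h2, hlen]
    simp [hzD]
  have hmapfil : (Pf.filter (fun z => decide (z.1 ∈ topk))).map (fun q => q.1) =
      D.filter (fun v => decide (v ∈ topk)) := by
    rw [← hfst, List.filter_map]
    rfl
  have hcont : D.filter (fun v => PySem.Set.contains (PySem.Set.ofList topk) v) =
      D.filter (fun v => decide (v ∈ topk)) := by
    apply List.filter_congr
    intro v _
    rw [Bool.eq_iff_iff]
    simp [PySem.Set.mem_ofList]
  rw [hcont, ← hmapfil, ← hcongr, hfil]
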